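-- pv_equiv track=rewrite | github.com/ianngiaw/HackerRank | RoadsAndLibraries/solution.py | dfs_label
-- ===== SOURCE A (Python) =====
-- def dfs_label(road_map, groups, current, label):
--     if groups[current] > -1:
--         return 0
--     groups[current] = label
--     total = 0
--     for neighbor in road_map[current]:
--         total += dfs_label(road_map, groups, neighbor, label)
--     return total + 1
-- ===== SOURCE B (Python) =====
-- def dfs_label(road_map, groups, current, label):
--     # Iterative DFS with an explicit stack instead of recursion.
--     # (Like the original, this labels `groups` in place; same final state.)
--     # Neighbors are pushed reversed so nodes are visited in the same
--     # left-to-right DFS order as the recursive version.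
--     stack = [current]
--     count = 0
--     while stack:
--         node = stack.pop()
--         if groups[node] > -1:
--             continue
--         groups[node] = label
--         count += 1
--         stack.extend(reversed(road_map[node]))
--     return count
-- ===== Notes on version B (the rewrite author's own statement) =====
-- stated objective: alternative
-- what changed: The recursive DFS (guard on entry, per-call subtotals summed up the call tree) is replaced by an iterative DFS with an explicit stack and a single counter: pop a node, skip it if already labeled, otherwise label it, count it and push its neighbors (reversed, preserving the left-to-right visit order); both mutate groups in place identically, and equivalence is proved on the return value.
-- outside the precondition, e.g. on dfs_label({0: [1], 1: []}, [-1, -1], 0, -5): A returns 2, B returns 2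
import Mathlib
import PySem

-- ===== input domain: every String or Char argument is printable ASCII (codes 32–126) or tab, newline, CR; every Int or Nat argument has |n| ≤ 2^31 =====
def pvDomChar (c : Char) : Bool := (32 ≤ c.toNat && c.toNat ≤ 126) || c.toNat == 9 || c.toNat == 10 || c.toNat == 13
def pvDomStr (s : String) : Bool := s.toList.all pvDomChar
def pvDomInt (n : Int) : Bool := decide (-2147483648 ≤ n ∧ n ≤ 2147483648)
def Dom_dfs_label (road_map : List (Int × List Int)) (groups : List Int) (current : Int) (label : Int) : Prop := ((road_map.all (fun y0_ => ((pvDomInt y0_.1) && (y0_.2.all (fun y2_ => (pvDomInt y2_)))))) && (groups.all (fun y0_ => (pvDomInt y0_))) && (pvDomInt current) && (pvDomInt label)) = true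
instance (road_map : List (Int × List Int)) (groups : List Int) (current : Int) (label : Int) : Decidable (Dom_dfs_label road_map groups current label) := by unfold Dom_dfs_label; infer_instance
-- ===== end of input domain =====

-- B replaces A's recursive DFS by an iterative DFS with an explicit stack (alternative
-- decomposition, same cost); both mutate `groups` identically in place, and the
-- equivalence proved here is about the return value.


-- ===== PORT A =====
-- A's recursion is ported with a fuel counter as totality guard (Python A recurses;
-- under Pre_ the fuel groups.length + 2 is proven sufficient). road_map is a dict
-- (association list, first-match lookup); groups[i] uses Python indexing (negative wrap).
mutual
def dfsA (rm : List (Int × List Int)) (lab : Int) : Nat → List Int → Int → Option (Int × List Int)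
  | 0, _, _ => none
  | f+1, g, cur =>
    match PySem.List.pyGet? g cur with
    | none => none                                   -- IndexError on groups[current]
    | some v =>
      if v > -1 then some (0, g)                     -- return 0
      else
        match PySem.List.pySet? g cur lab, (PySem.Dict.mk rm).get? cur with
        | some g1, some ns =>                        -- groups[current] = label; loop
            (dfsAList rm lab f ns g1 0).map (fun r => (r.1 + 1, r.2))  -- return total + 1
        | _, _ => none                               -- KeyError on road_map[current]
termination_by f _ _ => (f, 0)

def dfsAList (rm : List (Int × List Int)) (lab : Int) : Nat → List Int → List Int → Int → Option (Int × List Int)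
  | _, [], g, total => some (total, g)
  | f, n :: ns, g, total =>
    match dfsA rm lab f g n with
    | none => none
    | some (t, g1) => dfsAList rm lab f ns g1 (total + t)
termination_by f ns _ _ => (f, ns.length + 1)
end

def dfs_label (road_map : List (Int × List Int)) (groups : List Int) (current : Int) (label : Int) : Int :=
  ((dfsA road_map label (groups.length + 2) groups current).map Prod.fst).getD 0

-- ===== PORT B =====
-- total number of neighbor entries in road_map (used only for B's fuel bound)
def pvS (rm : List (Int × List Int)) : Nat := (rm.map (fun p => p.2.length)).sum

-- B's while-loop over the explicit stack, ported with the stack held top-first: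
-- Python's stack.extend(reversed(road_map[node])) followed by pops from the end is,
-- in the top-first representation, ns ++ rest. Fuel is the totality guard for the
-- while loop (proven sufficient under Pre_).
def loopB (rm : List (Int × List Int)) (lab : Int) : Nat → List Int → List Int → Int → Option (Int × List Int)
  | _, [], g, count => some (count, g)               -- while stack: exits
  | 0, _ :: _, _, _ => none
  | f+1, node :: rest, g, count =>
    match PySem.List.pyGet? g node with
    | none => none                                   -- IndexError on groups[node]
    | some v =>
      if v > -1 then loopB rm lab f rest g count     -- continue
      else
        match PySem.List.pySet? g node lab, (PySem.Dict.mk rm).get? node with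
        | some g1, some ns => loopB rm lab f (ns ++ rest) g1 (count + 1)
        | _, _ => none                               -- KeyError on road_map[node]
termination_by f _ _ _ => f

def dfs_label_alt (road_map : List (Int × List Int)) (groups : List Int) (current : Int) (label : Int) : Int :=
  ((loopB road_map label (1 + groups.length * (1 + pvS road_map)) [current] groups 0).map Prod.fst).getD 0

-- ===== PRECONDITION & SPEC =====
-- the DFS expands a node's neighbors exactly when its initial groups entry is ≤ -1
-- (out-of-range nodes expand nothing: the run stops there with an error, which pvOk reports)
def pvNexts (rm : List (Int × List Int)) (g0 : List Int) (n : Int) : List Int :=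
  if PySem.List.pyGetD g0 n 0 ≤ -1 then ((PySem.Dict.mk rm).get? n).getD [] else []

def pvStep (rm : List (Int × List Int)) (g0 : List Int) (R : Finset Int) : Finset Int :=
  R ∪ R.biUnion (fun n => (pvNexts rm g0 n).toFinset)

def pvIter (rm : List (Int × List Int)) (g0 : List Int) (cur : Int) : Nat → Finset Int
  | 0 => {cur}
  | k + 1 => pvStep rm g0 (pvIter rm g0 cur k)

-- the set of nodes the DFS visits: closure of {current} under neighbor expansion
-- (1 + pvS rm iterations saturate: there are at most 1 + pvS rm candidate nodes)
def pvReach (rm : List (Int × List Int)) (g0 : List Int) (cur : Int) : Finset Int :=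
  pvIter rm g0 cur (pvS rm + 1)

-- a visited node crashes neither groups[n] (IndexError) nor road_map[n] (KeyError)
def pvOk (rm : List (Int × List Int)) (g0 : List Int) (n : Int) : Prop :=
  PySem.Raise.InRange g0.length n ∧
    (PySem.List.pyGetD g0 n 0 > -1 ∨ ((PySem.Dict.mk rm).get? n).isSome)

-- Pre_ excludes (a) the inputs on which A raises — some visited node, i.e. node reachable
-- from current through initially-unlabeled nodes, triggers an IndexError or KeyError —
-- and (b) negative labels on an unlabeled start, which are outside the natural domain of a
-- component id (the caller passes an incrementing counter): a label ≤ -1 defeats the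
-- visited marking and makes A recurse without bound on any reachable cycle.
def Pre_dfs_label (road_map : List (Int × List Int)) (groups : List Int) (current : Int) (label : Int) : Prop :=
  (∀ n ∈ pvReach road_map groups current, pvOk road_map groups n) ∧
  (0 ≤ label ∨ PySem.List.pyGetD groups current 0 > -1)

instance (road_map : List (Int × List Int)) (groups : List Int) (current : Int) (label : Int) : Decidable (Pre_dfs_label road_map groups current label) := by
  unfold Pre_dfs_label pvOk PySem.Raise.InRange; infer_instance

def pvWitness_dfs_label : (List (Int × List Int)) × List Int × Int × Int :=
  ([(0, [1]), (1, [])], [-1, -1], 0, 1)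

def Spec_dfs_label (road_map : List (Int × List Int)) (groups : List Int) (current : Int) (label : Int) (out : Int) : Prop := out = dfs_label_alt road_map groups current label
instance (road_map : List (Int × List Int)) (groups : List Int) (current : Int) (label : Int) (out : Int) : Decidable (Spec_dfs_label road_map groups current label out) := by unfold Spec_dfs_label; infer_instance

-- ===== CLAIM (what is proved, stated in full; the proofs are below) =====
def Claim_equal_dfs_label : Prop := ∀ (road_map : List (Int × List Int)) (groups : List Int) (current : Int) (label : Int), Dom_dfs_label road_map groups current label → Pre_dfs_label road_map groups current label → Spec_dfs_label road_map groups current label (dfs_label road_map groups current label)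

-- ===== LEMMAS AND PROOFS =====

-- number of unlabeled entries (the termination measure of the DFS)
def pvU (g : List Int) : Nat := g.countP (fun x => decide (x ≤ -1))

lemma pvU_le_length (g : List Int) : pvU g ≤ g.length := List.countP_le_length

lemma pvIdx_lt {n : Nat} {i : Int} {j : Nat} (h : PySem.List.pyIdx? n i = some j) : j < n := by
  unfold PySem.List.pyIdx? at h
  split_ifs at h <;> simp_all <;> omega

lemma pvIdx_of_inRange {n : Nat} {i : Int} (h : PySem.Raise.InRange n i) :
    ∃ j, PySem.List.pyIdx? n i = some j ∧ j < n := by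
  obtain ⟨h1, h2⟩ := h
  by_cases p : 0 ≤ i
  · exact ⟨i.toNat, by unfold PySem.List.pyIdx?; rw [if_pos p, if_pos h2], by omega⟩
  · exact ⟨n - (-i).toNat, by unfold PySem.List.pyIdx?; rw [if_neg p, if_pos h1], by omega⟩

lemma pvGet_eq {g : List Int} {i : Int} {j : Nat} (hj : PySem.List.pyIdx? g.length i = some j)
    (hl : j < g.length) : PySem.List.pyGet? g i = some g[j] := by
  simp [PySem.List.pyGet?, hj, hl]

lemma pvSet_eq {g : List Int} {i : Int} {j : Nat} (v : Int)
    (hj : PySem.List.pyIdx? g.length i = some j) :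
    PySem.List.pySet? g i v = some (g.set j v) := by
  simp [PySem.List.pySet?, hj]

lemma pvGetD_eq {g : List Int} {i : Int} {j : Nat} (hj : PySem.List.pyIdx? g.length i = some j)
    (hl : j < g.length) : PySem.List.pyGetD g i 0 = g[j] := by
  simp [PySem.List.pyGetD, pvGet_eq hj hl]

lemma pvU_set {g : List Int} {j : Nat} (hl : j < g.length) (hv : g[j] ≤ -1)
    {lab : Int} (hlab : -1 < lab) : pvU (g.set j lab) + 1 = pvU g := by
  induction g generalizing j with
  | nil => simp at hl
  | cons a g ih =>
    cases j with
    | zero =>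
      simp at hv
      show pvU (lab :: g) + 1 = pvU (a :: g)
      simp [pvU, hv, show ¬ lab ≤ -1 by omega]
    | succ j =>
      simp at hl hv
      have := ih hl hv
      show pvU (a :: g.set j lab) + 1 = pvU (a :: g)
      simp only [pvU, List.countP_cons] at *
      omega

lemma pvDict_mem {rm : List (Int × List Int)} {k : Int} {ns : List Int}
    (h : (PySem.Dict.mk rm).get? k = some ns) : ∃ p ∈ rm, p.2 = ns := by
  unfold PySem.Dict.get? at h
  simp only [Option.map_eq_some_iff] at h
  obtain ⟨p, hp, rfl⟩ := h
  exact ⟨p, List.mem_of_find?_eq_some hp, rfl⟩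

lemma pvLen_le_S {rm : List (Int × List Int)} {k : Int} {ns : List Int}
    (h : (PySem.Dict.mk rm).get? k = some ns) : ns.length ≤ pvS rm := by
  obtain ⟨p, hp, rfl⟩ := pvDict_mem h
  exact List.single_le_sum (fun x _ => Nat.zero_le x) _ (List.mem_map_of_mem hp)

-- the state invariant of the run: groups entries are either initial or the label
def pvInv (g0 : List Int) (lab : Int) (g : List Int) : Prop :=
  g.length = g0.length ∧ ∀ j : Nat, j < g0.length → g.getD j 0 = g0.getD j 0 ∨ g.getD j 0 = lab

lemma pvInv_refl (g0 : List Int) (lab : Int) : pvInv g0 lab g0 :=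
  ⟨rfl, fun _ _ => Or.inl rfl⟩

lemma pvInv_set {g0 : List Int} {lab : Int} {g : List Int} (h : pvInv g0 lab g)
    (j : Nat) : pvInv g0 lab (g.set j lab) := by
  refine ⟨by simpa using h.1, fun k hk => ?_⟩
  have hk' : k < g.length := by rw [h.1]; exact hk
  by_cases hjl : j < g.length
  case neg =>
    rw [List.set_eq_of_length_le (by omega)]
    exact h.2 k hk
  have h1 : (g.set j lab).getD k 0 = (g.set j lab)[k]'(by simpa using hk') :=
    List.getD_eq_getElem _ 0 _
  rw [h1, List.getElem_set]
  by_cases hjk : j = k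
  · simp [hjk]
  · rw [if_neg hjk, ← List.getD_eq_getElem g 0 hk']
    exact h.2 k hk

-- ===== reachability: basic closure facts =====
lemma pvStep_mono {rm : List (Int × List Int)} {g0 : List Int} {R S : Finset Int}
    (h : R ⊆ S) : pvStep rm g0 R ⊆ pvStep rm g0 S :=
  Finset.union_subset_union h (Finset.biUnion_subset_biUnion_of_subset_left _ h)

lemma pvStep_incl (rm : List (Int × List Int)) (g0 : List Int) (R : Finset Int) :
    R ⊆ pvStep rm g0 R := Finset.subset_union_left

lemma pvIter_subset_succ (rm : List (Int × List Int)) (g0 : List Int) (cur : Int) :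
    ∀ k, pvIter rm g0 cur k ⊆ pvIter rm g0 cur (k + 1)
  | 0 => pvStep_incl rm g0 _
  | k + 1 => pvStep_mono (pvIter_subset_succ rm g0 cur k)

lemma pvCur_mem_iter (rm : List (Int × List Int)) (g0 : List Int) (cur : Int) :
    ∀ k, cur ∈ pvIter rm g0 cur k
  | 0 => Finset.mem_singleton_self cur
  | k + 1 => pvIter_subset_succ rm g0 cur k (pvCur_mem_iter rm g0 cur k)

lemma pvIter_bound (rm : List (Int × List Int)) (g0 : List Int) (cur : Int) :
    ∀ k, pvIter rm g0 cur k ⊆ insert cur (rm.flatMap (fun p => p.2)).toFinset := by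
  intro k
  induction k with
  | zero => intro x hx; simp [pvIter] at hx; simp [hx]
  | succ k ih =>
    intro x hx
    rcases Finset.mem_union.mp hx with h | h
    · exact ih h
    · obtain ⟨n, _, hxn⟩ := Finset.mem_biUnion.mp h
      rw [List.mem_toFinset] at hxn
      unfold pvNexts at hxn
      split_ifs at hxn with hc
      · cases hns : (PySem.Dict.mk rm).get? n with
        | none => rw [hns] at hxn; simp at hxn
        | some ns =>
          rw [hns] at hxn
          simp at hxn
          obtain ⟨p, hp, rfl⟩ := pvDict_mem hns
          exact Finset.mem_insert_of_mem (List.mem_toFinset.mpr (List.mem_flatMap.mpr ⟨p, hp, hxn⟩))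
      · simp at hxn

lemma pvIter_card_le (rm : List (Int × List Int)) (g0 : List Int) (cur : Int) (k : Nat) :
    (pvIter rm g0 cur k).card ≤ pvS rm + 1 := by
  have h1 := Finset.card_le_card (pvIter_bound rm g0 cur k)
  have h2 : (insert cur (rm.flatMap (fun p => p.2)).toFinset).card ≤ pvS rm + 1 := by
    have := Finset.card_insert_le cur (rm.flatMap (fun p => p.2)).toFinset
    have hlen : (rm.flatMap (fun p => p.2)).toFinset.card ≤ pvS rm := by
      have := List.toFinset_card_le (rm.flatMap (fun p => p.2))
      simpa [pvS, List.length_flatMap] using this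
    omega
  omega

lemma pvIter_grow (rm : List (Int × List Int)) (g0 : List Int) (cur : Int) :
    ∀ k, pvIter rm g0 cur (k + 1) ⊆ pvIter rm g0 cur k ∨
      k + 2 ≤ (pvIter rm g0 cur (k + 1)).card := by
  intro k
  induction k with
  | zero =>
    by_cases h : pvIter rm g0 cur 1 ⊆ pvIter rm g0 cur 0
    · exact Or.inl h
    · refine Or.inr ?_
      have hss : pvIter rm g0 cur 0 ⊂ pvIter rm g0 cur 1 :=
        Finset.ssubset_iff_subset_ne.mpr ⟨pvIter_subset_succ rm g0 cur 0,
          fun he => h (he ▸ Finset.Subset.refl _)⟩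
      have := Finset.card_lt_card hss
      have h0 : (pvIter rm g0 cur 0).card = 1 := by simp [pvIter]
      simp only [Nat.zero_add]
      omega
  | succ k ih =>
    rcases ih with h | h
    · exact Or.inl (pvStep_mono h)
    · by_cases hs : pvIter rm g0 cur (k + 2) ⊆ pvIter rm g0 cur (k + 1)
      · exact Or.inl hs
      · refine Or.inr ?_
        have hss : pvIter rm g0 cur (k + 1) ⊂ pvIter rm g0 cur (k + 2) :=
          Finset.ssubset_iff_subset_ne.mpr ⟨pvIter_subset_succ rm g0 cur (k + 1),
            fun he => hs (he ▸ Finset.Subset.refl _)⟩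
        have := Finset.card_lt_card hss
        show k + 1 + 2 ≤ (pvIter rm g0 cur (k + 2)).card
        omega

lemma pvReach_sat (rm : List (Int × List Int)) (g0 : List Int) (cur : Int) :
    pvStep rm g0 (pvReach rm g0 cur) ⊆ pvReach rm g0 cur := by
  rcases pvIter_grow rm g0 cur (pvS rm + 1) with h | h
  · exact h
  · have := pvIter_card_le rm g0 cur (pvS rm + 1 + 1)
    omega

lemma pvReach_closed {rm : List (Int × List Int)} {g0 : List Int} {cur n : Int}
    (hn : n ∈ pvReach rm g0 cur) (hu : PySem.List.pyGetD g0 n 0 ≤ -1)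
    {ns : List Int} (hns : (PySem.Dict.mk rm).get? n = some ns) :
    ∀ m ∈ ns, m ∈ pvReach rm g0 cur := by
  intro m hm
  apply pvReach_sat rm g0 cur
  refine Finset.mem_union_right _ (Finset.mem_biUnion.mpr ⟨n, hn, ?_⟩)
  rw [List.mem_toFinset]
  unfold pvNexts
  rw [if_pos hu, hns]
  exact hm

lemma pvCur_mem_reach (rm : List (Int × List Int)) (g0 : List Int) (cur : Int) :
    cur ∈ pvReach rm g0 cur := pvCur_mem_iter rm g0 cur _

-- ===== termination of A's port on Pre_ inputs =====
lemma pvTermA (rm : List (Int × List Int)) (lab : Int) (g0 : List Int) (cur0 : Int)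
    (hlab : -1 < lab)
    (hok : ∀ n ∈ pvReach rm g0 cur0, pvOk rm g0 n) :
    ∀ (f : Nat) (g : List Int) (cur : Int), pvInv g0 lab g →
      cur ∈ pvReach rm g0 cur0 →
      pvU g < f →
      ∃ t g', dfsA rm lab f g cur = some (t, g') ∧ pvInv g0 lab g' ∧ pvU g' ≤ pvU g := by
  intro f
  induction f with
  | zero => intro g cur _ _ hu; omega
  | succ f IH =>
    intro g cur hinv hcur hu
    have hlen : g.length = g0.length := hinv.1
    have hin : PySem.Raise.InRange g.length cur := by
      rw [hlen]; exact (hok cur hcur).1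
    obtain ⟨j, hj, hjl⟩ := pvIdx_of_inRange hin
    have hget := pvGet_eq hj hjl
    by_cases hv : g[j] > -1
    · exact ⟨0, g, by simp [dfsA, hget, hv], hinv, le_refl _⟩
    · -- current entry unlabeled now, hence unlabeled initially (it is not the label)
      have hjl0 : j < g0.length := hlen ▸ hjl
      have hgj : g.getD j 0 = g[j] := List.getD_eq_getElem g 0 hjl
      have hg0j : g0.getD j 0 = g0[j] := List.getD_eq_getElem g0 0 hjl0
      have h0 : g0[j] ≤ -1 := by
        rcases hinv.2 j hjl0 with h | h
        · rw [hgj, hg0j] at h; omega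
        · rw [hgj] at h; omega
      have hj0 : PySem.List.pyIdx? g0.length cur = some j := hlen ▸ hj
      have hexp : PySem.List.pyGetD g0 cur 0 ≤ -1 := by
        rw [pvGetD_eq hj0 hjl0]; exact h0
      have hd : ((PySem.Dict.mk rm).get? cur).isSome := by
        rcases (hok cur hcur).2 with h | h
        · omega
        · exact h
      obtain ⟨ns, hns⟩ := Option.isSome_iff_exists.mp hd
      have hset := pvSet_eq (g := g) lab hj
      have hu1 : pvU (g.set j lab) + 1 = pvU g := pvU_set hjl (by omega) hlab
      have hinv1 : pvInv g0 lab (g.set j lab) := pvInv_set hinv j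
      have hnb : ∀ n ∈ ns, n ∈ pvReach rm g0 cur0 := pvReach_closed hcur hexp hns
      have hlist : ∀ (ns' : List Int),
          (∀ n ∈ ns', n ∈ pvReach rm g0 cur0) →
          ∀ (g2 : List Int) (total : Int), pvInv g0 lab g2 → pvU g2 < f →
          ∃ t g', dfsAList rm lab f ns' g2 total = some (t, g') ∧ pvInv g0 lab g' ∧
            pvU g' ≤ pvU g2 := by
        intro ns'
        induction ns' with
        | nil => intro _ g2 total hl hu2; exact ⟨total, g2, by simp [dfsAList], hl, le_refl _⟩
        | cons n ns' ihl =>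
          intro hns' g2 total hl hu2
          obtain ⟨t1, g3, he, hl3, hu3⟩ :=
            IH g2 n hl (hns' n (List.mem_cons_self ..)) hu2
          obtain ⟨t, g', he2, hl', hu'⟩ :=
            ihl (fun m hm => hns' m (List.mem_cons_of_mem _ hm)) g3 (total + t1)
              hl3 (by omega)
          exact ⟨t, g', by simp [dfsAList, he, he2], hl', by omega⟩
      obtain ⟨t, g', he, hl', hu'⟩ := hlist ns hnb (g.set j lab) 0 hinv1 (by omega)
      refine ⟨t + 1, g', ?_, hl', by omega⟩
      simp [dfsA, hget, hv, hset, hns, he]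

-- the bridge: A's recursion on (cur :: rest) equals B's loop after n machine steps,
-- with n bounded in terms of the number of nodes newly labeled
lemma pvBridge (rm : List (Int × List Int)) (lab : Int) (hlab : -1 < lab) :
    ∀ (f : Nat) (g : List Int) (cur t : Int) (g' : List Int),
      dfsA rm lab f g cur = some (t, g') →
      ∃ n : Nat, n + pvU g' * (1 + pvS rm) ≤ 1 + pvU g * (1 + pvS rm) ∧
        ∀ (F : Nat) (rest : List Int) (c : Int),
          loopB rm lab (n + F) (cur :: rest) g c = loopB rm lab F rest g' (c + t) := by
  intro f
  induction f with
  | zero => intro g cur t g' h; simp [dfsA] at h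
  | succ f IH =>
    have hlist : ∀ (ns : List Int) (g : List Int) (acc t : Int) (g' : List Int),
        dfsAList rm lab f ns g acc = some (t, g') →
        ∃ m : Nat, m + pvU g' * (1 + pvS rm) ≤ ns.length + pvU g * (1 + pvS rm) ∧
          ∀ (F : Nat) (rest : List Int) (c : Int),
            loopB rm lab (m + F) (ns ++ rest) g c = loopB rm lab F rest g' (c + (t - acc)) := by
      intro ns
      induction ns with
      | nil =>
        intro g acc t g' h
        simp [dfsAList] at h
        obtain ⟨rfl, rfl⟩ := h
        exact ⟨0, by omega, fun F rest c => by simp⟩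
      | cons n ns ihl =>
        intro g acc t g' h
        rw [dfsAList] at h
        cases hA : dfsA rm lab f g n with
        | none => rw [hA] at h; simp at h
        | some r =>
          obtain ⟨t1, gm⟩ := r
          rw [hA] at h
          simp only at h
          obtain ⟨n1, b1, e1⟩ := IH g n t1 gm hA
          obtain ⟨m1, b2, e2⟩ := ihl gm (acc + t1) t g' h
          refine ⟨n1 + m1, by simp only [List.length_cons]; omega, fun F rest c => ?_⟩
          have h1 := e1 (m1 + F) (ns ++ rest) c
          have h2 := e2 F rest (c + t1)
          have hcnt : c + t1 + (t - (acc + t1)) = c + (t - acc) := by ring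
          rw [hcnt] at h2
          calc loopB rm lab (n1 + m1 + F) (n :: ns ++ rest) g c
              = loopB rm lab (n1 + (m1 + F)) (n :: (ns ++ rest)) g c := by
                  simp only [Nat.add_assoc, List.cons_append]
            _ = loopB rm lab (m1 + F) (ns ++ rest) gm (c + t1) := h1
            _ = loopB rm lab F rest g' (c + (t - acc)) := h2
    intro g cur t g' h
    rw [dfsA] at h
    cases hget : PySem.List.pyGet? g cur with
    | none => rw [hget] at h; simp at h
    | some v =>
      rw [hget] at h
      by_cases hv : v > -1
      · simp only [hv, if_pos] at h
        simp at h
        obtain ⟨rfl, rfl⟩ := h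
        refine ⟨1, by omega, fun F rest c => ?_⟩
        have : 1 + F = F + 1 := by omega
        rw [this, loopB, hget]
        all_goals simp [hv]
      · simp only [hv, if_neg, not_false_iff] at h
        -- recover the raw index to relate g1 to g
        obtain ⟨j, hj, hjl⟩ : ∃ j, PySem.List.pyIdx? g.length cur = some j ∧ j < g.length := by
          unfold PySem.List.pyGet? at hget
          cases hj : PySem.List.pyIdx? g.length cur with
          | none => rw [hj] at hget; simp at hget
          | some j => exact ⟨j, rfl, pvIdx_lt hj⟩
        have hvj : v = g[j] := by
          have h2 := pvGet_eq hj hjl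
          rw [hget] at h2
          exact Option.some_inj.mp h2
        have hset := pvSet_eq (g := g) lab hj
        rw [hset] at h
        cases hns : (PySem.Dict.mk rm).get? cur with
        | none => rw [hns] at h; simp at h
        | some ns =>
          rw [hns] at h
          simp only [Option.map_eq_some_iff] at h
          obtain ⟨⟨ts, g''⟩, hL, hE⟩ := h
          simp only [Prod.mk.injEq] at hE
          obtain ⟨ht, rfl⟩ := hE
          obtain ⟨m, bm, em⟩ := hlist ns (g.set j lab) 0 ts g'' hL
          have hu1 : pvU (g.set j lab) + 1 = pvU g := pvU_set hjl (by omega) hlab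
          have hns_le : ns.length ≤ pvS rm := pvLen_le_S hns
          have hX : pvU g * (1 + pvS rm) = pvU (g.set j lab) * (1 + pvS rm) + (1 + pvS rm) := by
            rw [← hu1]; ring
          refine ⟨1 + m, by omega, fun F rest c => ?_⟩
          have hstep : 1 + m + F = (m + F) + 1 := by omega
          rw [hstep, loopB, hget]
          simp only [hv, if_neg, not_false_iff, hset, hns]
          have := em F rest (c + 1)
          have hcnt : c + 1 + (ts - 0) = c + t := by omega
          rw [hcnt] at this
          exact this

-- ===== VERDICT (by name: the statement is the Claim_ definition above) =====
theorem dfs_label_spec : Claim_equal_dfs_label := by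
  intro rm g cur lab _ hpre
  unfold Spec_dfs_label dfs_label dfs_label_alt
  obtain ⟨hok, hdisj⟩ := hpre
  have hcur := pvCur_mem_reach rm g cur
  have hin : PySem.Raise.InRange g.length cur := (hok cur hcur).1
  obtain ⟨j, hj, hjl⟩ := pvIdx_of_inRange hin
  have hget := pvGet_eq hj hjl
  by_cases hv : g[j] > -1
  · -- already labeled: both return 0
    have hA : dfsA rm lab (g.length + 2) g cur = some (0, g) := by
      rw [show g.length + 2 = (g.length + 1) + 1 from rfl, dfsA, hget]; simp [hv]
    obtain ⟨k, hk⟩ : ∃ k, 1 + g.length * (1 + pvS rm) = k + 1 := ⟨g.length * (1 + pvS rm), by omega⟩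
    have hB : loopB rm lab (1 + g.length * (1 + pvS rm)) [cur] g 0 = some (0, g) := by
      rw [hk, loopB, hget]
      try simp [hv, loopB]
    rw [hA, hB]
  · have hlab : -1 < lab := by
      rcases hdisj with h | h
      · omega
      · rw [pvGetD_eq hj hjl] at h; omega
    obtain ⟨t, g', hA, _, _⟩ :=
      pvTermA rm lab g cur hlab hok (g.length + 2) g cur (pvInv_refl g lab) hcur
        (by have := pvU_le_length g; omega)
    obtain ⟨n, hb, he⟩ := pvBridge rm lab hlab (g.length + 2) g cur t g' hA
    have hn : n ≤ 1 + g.length * (1 + pvS rm) := by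
      have h1 : pvU g * (1 + pvS rm) ≤ g.length * (1 + pvS rm) :=
        Nat.mul_le_mul_right _ (pvU_le_length g)
      omega
    have hsplit : 1 + g.length * (1 + pvS rm) = n + (1 + g.length * (1 + pvS rm) - n) := by omega
    have hB := he (1 + g.length * (1 + pvS rm) - n) [] 0
    rw [loopB] at hB
    rw [hA, hsplit, hB]
    simp
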